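-- pv_equiv track=rewrite | github.com/dron-ex/laba5 | individual2.py | calculate_product_and_sum
-- ===== SOURCE A (Python) =====
-- def calculate_product_and_sum(numbers):
--     # 1. Произведение элементов списка с четными номерами
--     product_even_indices = 1
--     for i in range(0, len(numbers), 2):  # проходим по четным индексам
--         product_even_indices *= numbers[i]
--
--     # 2. Сумма элементов между первым и последним нулями
--     try:
--         first_zero_index = numbers.index(0)
--         last_zero_index = len(numbers) - 1 - numbers[::-1].index(0)
--
--         if first_zero_index < last_zero_index:
--             sum_between_zeros = sum(numbers[first_zero_index + 1:last_zero_index])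
--         else:
--             sum_between_zeros = 0
--     except ValueError:
--         # Если нулей нет, возвращаем 0
--         sum_between_zeros = 0
--
--     return product_even_indices, sum_between_zeros
-- ===== SOURCE B (Python) =====
-- def calculate_product_and_sum(numbers):
--     # One forward pass: multiply even-index elements and collect zero positions;
--     # then sum the slice strictly between the first and last zero (if they differ).
--     product_even = 1
--     zeros = []
--     for i, x in enumerate(numbers):
--         if i % 2 == 0:
--             product_even *= x
--         if x == 0:
--             zeros.append(i)
--     if len(zeros) >= 2:
--         sum_between = sum(numbers[zeros[0] + 1:zeros[-1]])
--     else: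
--         sum_between = 0
--     return product_even, sum_between
-- ===== Notes on version B (the rewrite author's own statement) =====
-- stated objective: alternative
-- what changed: Replaces A's index-range product loop, two .index lookups and a reversed-copy scan with a single enumerate pass that accumulates the even-index product and the list of zero positions, then sums the slice between the first and last recorded zero.
import Mathlib
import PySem

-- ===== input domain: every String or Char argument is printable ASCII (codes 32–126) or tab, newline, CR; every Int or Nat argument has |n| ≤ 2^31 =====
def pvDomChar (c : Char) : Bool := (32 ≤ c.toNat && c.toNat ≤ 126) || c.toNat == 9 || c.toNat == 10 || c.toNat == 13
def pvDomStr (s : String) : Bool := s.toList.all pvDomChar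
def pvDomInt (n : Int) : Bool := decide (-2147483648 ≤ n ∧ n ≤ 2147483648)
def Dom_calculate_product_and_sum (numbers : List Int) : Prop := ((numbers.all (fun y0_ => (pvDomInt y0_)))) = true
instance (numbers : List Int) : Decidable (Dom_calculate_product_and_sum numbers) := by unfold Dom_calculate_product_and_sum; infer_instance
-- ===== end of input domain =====

-- B replaces A's index-range product loop, two .index lookups and a reversed-copy scan
-- with a single enumerate pass collecting the even-index product and the zero positions (alternative decomposition).

-- ===== PORT A =====
def calculate_product_and_sum (numbers : List Int) : Int × Int :=
  -- for i in range(0, len(numbers), 2): product *= numbers[i]   (index always in range)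
  let product_even_indices :=
    (PySem.List.pyRange 0 (PySem.List.len numbers) 2).foldl
      (fun acc i => acc * PySem.List.pyGetD numbers i 0) 1
  let sum_between_zeros :=
    match PySem.List.index? numbers 0 with
    | none => 0   -- except ValueError: no zero at all
    | some first_zero_index =>
      match PySem.List.index? ((PySem.List.slice? numbers none none (-1)).getD []) 0 with
      | none => 0   -- except ValueError (unreachable here: 0 is in numbers)
      | some r =>
        let last_zero_index : Int := (PySem.List.len numbers : Int) - 1 - (r : Int)
        if (first_zero_index : Int) < last_zero_index then
          (PySem.List.slice numbers (some ((first_zero_index : Int) + 1)) (some last_zero_index)).sum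
        else 0
  (product_even_indices, sum_between_zeros)

-- ===== PORT B =====
def calculate_product_and_sum_alt (numbers : List Int) : Int × Int :=
  -- single pass over enumerate(numbers): (product_even, zeros)
  let st :=
    (PySem.List.enumerate numbers 0).foldl
      (fun (st : Int × List Int) p =>
        let st1 := if PySem.Int.mod p.1 2 = 0 then (st.1 * p.2, st.2) else st
        if p.2 = 0 then (st1.1, st1.2 ++ [p.1]) else st1)
      (1, [])
  let sum_between :=
    if st.2.length ≥ 2 then
      (PySem.List.slice numbers (some (PySem.List.pyGetD st.2 0 0 + 1))
        (some (PySem.List.pyGetD st.2 (-1) 0))).sum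
    else 0
  (st.1, sum_between)

-- ===== PRECONDITION & SPEC =====
def Spec_calculate_product_and_sum (numbers : List Int) (out : Int × Int) : Prop := out = calculate_product_and_sum_alt numbers
instance (numbers : List Int) (out : Int × Int) : Decidable (Spec_calculate_product_and_sum numbers out) := by unfold Spec_calculate_product_and_sum; infer_instance

-- ===== CLAIM (what is proved, stated in full; the proofs are below) =====
def Claim_equal_calculate_product_and_sum : Prop := ∀ (numbers : List Int), Dom_calculate_product_and_sum numbers → Spec_calculate_product_and_sum numbers (calculate_product_and_sum numbers)

-- ===== LEMMAS AND PROOFS =====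

def zeroPos (xs : List Int) : List Nat :=
  (List.range xs.length).filter (fun i => decide (xs.getD i 0 = 0))
lemma zeroPos_cons (x : Int) (t : List Int) :
    zeroPos (x :: t) =
      (if x = 0 then [0] else []) ++ (zeroPos t).map (· + 1) := by
  simp only [zeroPos, List.length_cons, List.range_succ_eq_map, List.filter_cons]
  by_cases hx : x = 0 <;>
    simp [hx, List.filter_map, Function.comp_def] <;>
    exact List.map_congr_left (fun a _ => rfl)

def prodEvenAux : List Int → Bool → Int
  | [], _ => 1
  | x :: t, b => if b then x * prodEvenAux t (!b) else prodEvenAux t (!b)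

lemma foldB_eq (xs : List Int) : ∀ (s : Int) (p : Int) (zs : List Int),
    (PySem.List.enumerate xs s).foldl
      (fun (st : Int × List Int) q =>
        let st1 := if PySem.Int.mod q.1 2 = 0 then (st.1 * q.2, st.2) else st
        if q.2 = 0 then (st1.1, st1.2 ++ [q.1]) else st1)
      (p, zs)
    = (p * prodEvenAux xs (decide (PySem.Int.mod s 2 = 0)),
       zs ++ (zeroPos xs).map (fun (i : Nat) => s + (i : Int))) := by
  induction xs with
  | nil => intro s p zs; simp [PySem.List.enumerate, zeroPos, prodEvenAux]
  | cons x t ih =>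
    intro s p zs
    rw [PySem.List.enumerate_cons, List.foldl_cons]
    have hmod : PySem.Int.mod (s+1) 2 = 0 ↔ ¬ (PySem.Int.mod s 2 = 0) := by
      rw [PySem.Int.mod_eq_emod_of_pos (by norm_num), PySem.Int.mod_eq_emod_of_pos (by norm_num)]
      omega
    have hparity : (decide (PySem.Int.mod (s+1) 2 = 0)) = ! (decide (PySem.Int.mod s 2 = 0)) := by
      by_cases hb : PySem.Int.mod s 2 = 0
      · rw [decide_eq_true hb, decide_eq_false (fun h => (hmod.mp h) hb)]; rfl
      · rw [decide_eq_false hb, decide_eq_true (hmod.mpr hb)]; rfl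
    have hmap : ∀ (u : Int) (l : List Nat),
        (l.map (fun i => i + 1)).map (fun (i : Nat) => u + (i : Int))
          = l.map (fun (i : Nat) => (u+1) + (i : Int)) := by
      intro u l
      rw [List.map_map]
      refine List.map_congr_left (fun a _ => ?_)
      simp only [Function.comp]
      push_cast
      ring
    by_cases hx : x = 0 <;> by_cases hb : PySem.Int.mod s 2 = 0 <;>
      simp only [hx, hb, decide_true, decide_false, if_true, if_false, ite_true, ite_false] <;>
      rw [ih (s+1), hparity] <;>
      simp only [hb, decide_true, decide_false, Bool.not_true, Bool.not_false] <;>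
      rw [zeroPos_cons] <;>
      simp only [hx, if_true, if_false, ite_true, ite_false, Bool.false_eq_true,
        Bool.true_eq_false, prodEvenAux, Bool.not_true, Bool.not_false,
        List.map_append, List.map_cons, List.map_nil, Nat.cast_zero, add_zero,
        List.append_assoc, List.nil_append, List.singleton_append, Prod.mk.injEq, hmap] <;>
      exact ⟨by ring, by trivial⟩

lemma pyRange_two (m : Nat) :
    PySem.List.pyRange 0 (m : Int) 2 = (List.range ((m+1)/2)).map (fun (k : Nat) => 2 * (k : Int)) := by
  rw [PySem.List.pyRange_of_pos _ _ (by norm_num : (0:Int) < 2)]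
  have h1 : ((m:Int) - 0 + 2 - 1) / 2 = (((m+1)/2 : Nat) : Int) := by
    rw [Int.natCast_div]
    push_cast
    ring_nf
  rcases Nat.eq_zero_or_pos m with hm | hm
  · subst hm; simp
  · rw [if_pos (by exact_mod_cast hm), h1, Int.toNat_natCast]
    exact List.map_congr_left (fun a _ => by ring)

lemma range2_foldl : ∀ (xs : List Int) (acc : Int),
    (List.range ((xs.length+1)/2)).foldl (fun a k => a * xs.getD (2*k) 0) acc
      = acc * prodEvenAux xs true
  | [], acc => by simp [prodEvenAux]
  | [x], acc => by simp [prodEvenAux, List.range_succ]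
  | x :: y :: t, acc => by
    have ih := range2_foldl t
    have hl : ((x :: y :: t).length + 1)/2 = (t.length+1)/2 + 1 := by
      simp only [List.length_cons]; omega
    rw [hl, List.range_succ_eq_map, List.foldl_cons, List.foldl_map]
    have hfun : (fun (a : Int) (k : Nat) => a * (x :: y :: t).getD (2 * Nat.succ k) 0)
        = fun (a : Int) (k : Nat) => a * t.getD (2*k) 0 := by
      funext a k
      have h2 : 2 * Nat.succ k = (2*k) + 1 + 1 := by omega
      rw [h2, List.getD_cons_succ, List.getD_cons_succ]
    rw [hfun, ih]
    simp [prodEvenAux, mul_assoc]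

lemma prodA_eq (xs : List Int) (acc : Int) :
    (PySem.List.pyRange 0 (PySem.List.len xs) 2).foldl
      (fun a i => a * PySem.List.pyGetD xs i 0) acc = acc * prodEvenAux xs true := by
  have hlen : PySem.List.len xs = (xs.length : Int) := rfl
  rw [hlen, pyRange_two, List.foldl_map]
  have hfun : (fun (a : Int) (k : Nat) => a * PySem.List.pyGetD xs (2 * (k : Int)) 0)
      = fun (a : Int) (k : Nat) => a * xs.getD (2*k) 0 := by
    funext a k
    congr 1
    rw [show (2 * (k : Int)) = ((2*k : Nat) : Int) by push_cast; ring, PySem.List.pyGetD_natCast]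
  rw [hfun]
  exact range2_foldl xs acc

lemma mem_zeroPos {xs : List Int} {i : Nat} :
    i ∈ zeroPos xs ↔ ∃ h : i < xs.length, xs[i] = 0 := by
  simp only [zeroPos, List.mem_filter, List.mem_range, decide_eq_true_eq]
  constructor
  · rintro ⟨h, hz⟩; exact ⟨h, by rwa [List.getD_eq_getElem _ _ h] at hz⟩
  · rintro ⟨h, hz⟩; exact ⟨h, by rwa [List.getD_eq_getElem _ _ h]⟩

lemma zeroPos_sorted (xs : List Int) : (zeroPos xs).Pairwise (· < ·) :=
  List.Pairwise.filter _ List.pairwise_lt_range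

lemma zeroPos_eq_nil_iff {xs : List Int} : zeroPos xs = [] ↔ (0:Int) ∉ xs := by
  rw [List.eq_nil_iff_forall_not_mem]
  constructor
  · intro h hmem
    obtain ⟨i, hi, hz⟩ := List.mem_iff_getElem.mp hmem
    exact h i (mem_zeroPos.mpr ⟨hi, hz⟩)
  · intro h i hi
    obtain ⟨hlt, hz⟩ := mem_zeroPos.mp hi
    exact h (hz ▸ List.getElem_mem hlt)

-- first zero
lemma idxOf?_of_zeroPos {xs : List Int} {h : Nat} {rest : List Nat}
    (hZ : zeroPos xs = h :: rest) : List.idxOf? (0:Int) xs = some h := by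
  have hmem : h ∈ zeroPos xs := by rw [hZ]; exact List.mem_cons_self
  obtain ⟨hlt, hz⟩ := mem_zeroPos.mp hmem
  rw [List.idxOf?_eq_some_iff]
  refine ⟨hlt, hz, fun j hj hjz => ?_⟩
  have hjm : j ∈ zeroPos xs := mem_zeroPos.mpr ⟨Nat.lt_trans hj hlt, hjz⟩
  rw [hZ] at hjm
  rcases List.mem_cons.mp hjm with rfl | hjr
  · omega
  · have := (List.pairwise_cons.mp (hZ ▸ zeroPos_sorted xs)).1 j hjr
    omega

-- last zero, via the reversed list
lemma idxOf?_reverse_of_zeroPos {xs : List Int} {h : Nat} {rest : List Nat}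
    (hZ : zeroPos xs = h :: rest) :
    List.idxOf? (0:Int) xs.reverse
      = some (xs.length - 1 - (zeroPos xs).getLast (by rw [hZ]; simp)) := by
  set Z := zeroPos xs with hZdef
  have hne : Z ≠ [] := by rw [hZ]; simp
  set g := Z.getLast hne with hg
  have hgm : g ∈ Z := List.getLast_mem hne
  obtain ⟨hglt, hgz⟩ := mem_zeroPos.mp hgm
  have hmax : ∀ j ∈ Z, j ≤ g := by
    intro j hj
    obtain ⟨i, hi, hij⟩ := List.mem_iff_getElem.mp hj
    have hZpos : 0 < Z.length := List.length_pos_of_ne_nil hne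
    rw [hg, List.getLast_eq_getElem]
    rcases Nat.lt_or_ge i (Z.length - 1) with hlt | hge
    · exact le_of_lt (hij ▸ List.pairwise_iff_getElem.mp (zeroPos_sorted xs) i (Z.length-1) hi (Nat.sub_lt hZpos Nat.one_pos) hlt)
    · have : i = Z.length - 1 := by omega
      subst this; omega
  rw [List.idxOf?_eq_some_iff]
  have hlen : xs.length - 1 - g < xs.reverse.length := by simp; omega
  refine ⟨hlen, ?_, fun j hj hjz => ?_⟩
  · rw [List.getElem_reverse]
    have : xs.length - 1 - (xs.length - 1 - g) = g := by omega
    simp_rw [this]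
    exact hgz
  · rw [List.getElem_reverse] at hjz
    have hjlt : xs.length - 1 - j < xs.length := by omega
    have hjm : xs.length - 1 - j ∈ Z := mem_zeroPos.mpr ⟨hjlt, hjz⟩
    have := hmax _ hjm
    omega

lemma pyGetD_cons_zero (a : Int) (l : List Int) (d : Int) :
    PySem.List.pyGetD (a :: l) 0 d = a := by
  simp [PySem.List.pyGetD, PySem.List.pyGet?, PySem.List.pyIdx?]

lemma pyGetD_neg_one (l : List Int) (d : Int) (hl : l ≠ []) :
    PySem.List.pyGetD l (-1) d = l.getLast?.getD d := by
  have hn : 0 < l.length := List.length_pos_of_ne_nil hl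
  simp only [PySem.List.pyGetD, PySem.List.pyGet?, PySem.List.pyIdx?, List.getLast?_eq_getElem?]
  rw [if_neg (by omega), if_pos (by omega : -(l.length : Int) ≤ -1)]
  norm_num

-- ===== VERDICT (by name: the statement is the Claim_ definition above) =====
theorem calculate_product_and_sum_spec : Claim_equal_calculate_product_and_sum := by
  intro numbers _
  unfold Spec_calculate_product_and_sum
  unfold calculate_product_and_sum calculate_product_and_sum_alt
  rw [prodA_eq, foldB_eq numbers 0 1 []]
  have hm0 : PySem.Int.mod (0:Int) 2 = 0 := rfl
  simp only [hm0, decide_true, one_mul, List.nil_append, zero_add]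
  rcases hZ : zeroPos numbers with _ | ⟨h, rest⟩
  · -- no zero at all: both sums are 0
    rw [show PySem.List.index? numbers 0 = List.idxOf? 0 numbers from rfl,
      List.idxOf?_eq_none_iff.mpr (zeroPos_eq_nil_iff.mp hZ)]
    simp
  · -- at least one zero
    have hne : zeroPos numbers ≠ [] := by rw [hZ]; simp
    have hhm : h ∈ zeroPos numbers := by rw [hZ]; exact List.mem_cons_self
    obtain ⟨hhlt, -⟩ := mem_zeroPos.mp hhm
    set g := (zeroPos numbers).getLast hne with hgdef
    have hgm : g ∈ zeroPos numbers := List.getLast_mem _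
    obtain ⟨hglt, -⟩ := mem_zeroPos.mp hgm
    have hglast : (h :: rest).getLast? = some g := by
      rw [← hZ]; exact List.getLast?_eq_getLast hne
    rw [show PySem.List.index? numbers 0 = List.idxOf? 0 numbers from rfl,
      idxOf?_of_zeroPos hZ, PySem.List.slice?_none_none_neg_one]
    rw [show (some numbers.reverse).getD [] = numbers.reverse from rfl,
      show PySem.List.index? numbers.reverse 0 = List.idxOf? 0 numbers.reverse from rfl,
      idxOf?_reverse_of_zeroPos hZ]
    dsimp only
    have hga : (PySem.List.len numbers : Int) - 1 - ((numbers.length - 1 - g : Nat) : Int) = (g : Int) := by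
      have hl : PySem.List.len numbers = (numbers.length : Int) := rfl
      rw [hl]; omega
    rw [hga]
    rcases hR : rest with _ | ⟨r, rs⟩
    · -- exactly one zero: h = g, both branches give 0
      rw [hR] at hglast
      simp only [List.getLast?_singleton, Option.some.injEq] at hglast
      rw [hglast]
      simp
    · -- at least two zeros
      rw [hR] at hglast
      rw [List.getLast?_cons_cons] at hglast
      have hgm2 : g ∈ r :: rs := List.mem_of_getLast? hglast
      have hsorted := zeroPos_sorted numbers
      rw [hZ, hR] at hsorted
      have hhg : h < g := (List.pairwise_cons.mp hsorted).1 g hgm2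
      have hcond : ((h : Int) < (g : Int)) := by exact_mod_cast hhg
      rw [if_pos hcond]
      have hlen2 : 2 ≤ ((h :: r :: rs).map (fun (i : Nat) => (i : Int))).length := by
        simp
      rw [if_pos hlen2]
      have hhead : PySem.List.pyGetD ((h :: r :: rs).map (fun (i : Nat) => (i : Int))) 0 0 = (h : Int) := by
        rw [List.map_cons, pyGetD_cons_zero]
      have hlast : PySem.List.pyGetD ((h :: r :: rs).map (fun (i : Nat) => (i : Int))) (-1) 0 = (g : Int) := by
        rw [pyGetD_neg_one _ _ (by simp), List.getLast?_map, List.getLast?_cons_cons, hglast]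
        rfl
      rw [hhead, hlast]
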